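-- pv_equiv track=rewrite | github.com/ll7/paf21-1 | components/global_planner/node/src/global_planner/globalPlanerFirstDraft.py | findMapingConnectin
-- ===== SOURCE A (Python) =====
-- def findMapingConnectin(junctions, junction_id, first):
--     index = 0
--     if first:
--         for map in junctions:
--             if int(map['junction_id']) == int(junction_id):
--                 return index
--             index += 1
--         return -1
--     else:
--         for map in junctions:
--             if int(map['junction_id']) == int(junction_id):
--                 index += 1
--         rec = findMapingConnectin(junctions, junction_id, True)
--         if rec == None or rec == -1:
--             return -1
--         else:
--             return index + rec -1
-- ===== SOURCE B (Python) =====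
-- def findMapingConnectin(junctions, junction_id, first):
--     if first:
--         for i, m in enumerate(junctions):
--             if int(m['junction_id']) == int(junction_id):
--                 return i
--         return -1
--     count = 0
--     first_index = -1
--     for i, m in enumerate(junctions):
--         if int(m['junction_id']) == int(junction_id):
--             count += 1
--             if first_index == -1:
--                 first_index = i
--     return -1 if first_index == -1 else count + first_index - 1
-- ===== Notes on version B (the rewrite author's own statement) =====
-- stated objective: simpler
-- what changed: The non-first branch's count loop plus recursive self-call (a second full scan) is replaced by a single pass that tracks both the match count and the index of the first match, and the dead 'rec == None' check is dropped.
import Mathlib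
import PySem

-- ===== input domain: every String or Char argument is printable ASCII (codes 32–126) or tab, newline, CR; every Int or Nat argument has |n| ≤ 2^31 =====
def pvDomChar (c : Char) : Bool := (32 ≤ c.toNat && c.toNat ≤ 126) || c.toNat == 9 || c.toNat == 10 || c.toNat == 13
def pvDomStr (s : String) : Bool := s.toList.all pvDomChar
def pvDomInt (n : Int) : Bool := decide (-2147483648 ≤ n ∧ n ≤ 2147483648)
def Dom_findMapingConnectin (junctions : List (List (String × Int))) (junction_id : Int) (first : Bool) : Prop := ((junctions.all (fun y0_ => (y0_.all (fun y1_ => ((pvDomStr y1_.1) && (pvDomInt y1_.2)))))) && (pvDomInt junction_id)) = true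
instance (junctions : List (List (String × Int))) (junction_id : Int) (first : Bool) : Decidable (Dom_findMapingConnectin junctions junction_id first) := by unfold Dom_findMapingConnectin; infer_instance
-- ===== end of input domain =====

-- B merges the non-first branch's two scans (count loop + recursive first-index search) into one
-- pass tracking both; return values are proved identical on all inputs where A returns (Pre_).

-- map['junction_id'] : first-match association-list lookup; none = KeyError (excluded by Pre_)
def pvLookupJ (m : List (String × Int)) : Option Int := m.lookup "junction_id"
-- int(map['junction_id']) == int(junction_id); the values are ints, so int() is the identity.
-- A missing key means Python raised (excluded by Pre_); the port treats it as a non-match.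
def pvMatch (m : List (String × Int)) (id : Int) : Bool := pvLookupJ m == some id

-- ===== PORT A =====
-- the 'first' loop: return index at the first match, else -1
def pvA_firstLoop : List (List (String × Int)) → Int → Int → Int
  | [], _, _ => -1
  | m :: rest, id, index =>
      if pvMatch m id then index else pvA_firstLoop rest id (index + 1)

def findMapingConnectin (junctions : List (List (String × Int))) (junction_id : Int) (first : Bool) : Int :=
  if first then
    pvA_firstLoop junctions junction_id 0
  else
    let index := junctions.foldl (fun index m => if pvMatch m junction_id then index + 1 else index) (0 : Int)
    let r := findMapingConnectin junctions junction_id true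
    -- Python's 'rec == None' branch is dead: the first=True call always returns an int
    if r == -1 then -1 else index + r - 1
termination_by (if first then 0 else 1)
decreasing_by simp_all

-- ===== PORT B =====
-- B's first branch: short-circuit search over enumerate(junctions)
def pvB_search : List (Int × List (String × Int)) → Int → Int
  | [], _ => -1
  | (i, m) :: rest, id => if pvMatch m id then i else pvB_search rest id

def findMapingConnectin_alt (junctions : List (List (String × Int))) (junction_id : Int) (first : Bool) : Int :=
  if first then
    pvB_search (PySem.List.enumerate junctions) junction_id
  else
    let s := (PySem.List.enumerate junctions).foldl
      (fun (s : Int × Int) p =>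
        if pvMatch p.2 junction_id then (s.1 + 1, if s.2 == -1 then p.1 else s.2) else s)
      ((0 : Int), (-1 : Int))
    if s.2 == -1 then -1 else s.1 + s.2 - 1

-- ===== PRECONDITION & SPEC =====
-- Pre_ excludes exactly the inputs where Python A raises KeyError ('junction_id' missing from a
-- dict it inspects): with first=False every dict is scanned; with first=True only dicts up to and
-- including the first match are inspected.  B raises on exactly the same inputs.
def Pre_findMapingConnectin (junctions : List (List (String × Int))) (junction_id : Int) (first : Bool) : Prop :=
  if first then
    ∀ i ∈ List.range junctions.length, (pvLookupJ (junctions.getD i [])).isSome = false →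
      ∃ j ∈ List.range i, pvMatch (junctions.getD j []) junction_id = true
  else
    ∀ m ∈ junctions, (pvLookupJ m).isSome = true
instance (junctions : List (List (String × Int))) (junction_id : Int) (first : Bool) : Decidable (Pre_findMapingConnectin junctions junction_id first) := by unfold Pre_findMapingConnectin; infer_instance

def pvWitness_findMapingConnectin : (List (List (String × Int))) × Int × Bool := ([[("junction_id", 1)], [("junction_id", 2)]], 1, false)

def Spec_findMapingConnectin (junctions : List (List (String × Int))) (junction_id : Int) (first : Bool) (out : Int) : Prop := out = findMapingConnectin_alt junctions junction_id first
instance (junctions : List (List (String × Int))) (junction_id : Int) (first : Bool) (out : Int) : Decidable (Spec_findMapingConnectin junctions junction_id first out) := by unfold Spec_findMapingConnectin; infer_instance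

-- ===== CLAIM (what is proved, stated in full; the proofs are below) =====
def Claim_equal_findMapingConnectin : Prop := ∀ (junctions : List (List (String × Int))) (junction_id : Int) (first : Bool), Dom_findMapingConnectin junctions junction_id first → Pre_findMapingConnectin junctions junction_id first → Spec_findMapingConnectin junctions junction_id first (findMapingConnectin junctions junction_id first)

-- ===== LEMMAS AND PROOFS =====

-- A's indexed search loop equals B's search over enumerate, for any starting index.
theorem pvA_firstLoop_eq_search (xs : List (List (String × Int))) (id : Int) :
    ∀ n : Int, pvA_firstLoop xs id n = pvB_search (PySem.List.enumerate xs n) id := by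
  induction xs with
  | nil => intro n; simp [pvA_firstLoop, PySem.List.enumerate_nil, pvB_search]
  | cons m rest ih =>
      intro n
      rw [PySem.List.enumerate_cons]
      simp only [pvA_firstLoop, pvB_search]
      split <;> simp [ih]

-- Invariant of B's single pass: it computes A's count fold and (when started with -1)
-- the first matching index, provided the start index is nonnegative.
theorem pvB_fold_inv (id : Int) :
    ∀ (xs : List (List (String × Int))) (n c fi : Int), 0 ≤ n →
      (PySem.List.enumerate xs n).foldl
        (fun (s : Int × Int) p =>
          if pvMatch p.2 id then (s.1 + 1, if s.2 == -1 then p.1 else s.2) else s) (c, fi)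
      = (xs.foldl (fun a m => if pvMatch m id then a + 1 else a) c,
         if fi == -1 then pvB_search (PySem.List.enumerate xs n) id else fi) := by
  intro xs
  induction xs with
  | nil => intro n c fi _; simp [PySem.List.enumerate_nil, pvB_search]
  | cons m rest ih =>
      intro n c fi hn
      rw [PySem.List.enumerate_cons]
      simp only [List.foldl_cons, pvB_search]
      by_cases h : pvMatch m id = true
      · simp only [h, if_true]
        rw [ih (n + 1) (c + 1) (if fi == -1 then n else fi) (by omega)]
        have hn' : ((n == -1) = false) := by simp; omega
        by_cases hfi : (fi == -1) = true
        · simp [hfi, hn']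
        · simp only [Bool.not_eq_true] at hfi
          simp [hfi]
      · simp only [Bool.not_eq_true] at h
        simp only [h, Bool.false_eq_true, if_false]
        rw [ih (n + 1) c fi (by omega)]

-- ===== VERDICT (by name: the statement is the Claim_ definition above) =====
theorem findMapingConnectin_spec : Claim_equal_findMapingConnectin := by
  intro junctions junction_id first _ _
  unfold Spec_findMapingConnectin findMapingConnectin findMapingConnectin_alt
  cases first with
  | true => simp [pvA_firstLoop_eq_search]
  | false =>
      have hA : findMapingConnectin junctions junction_id true
          = pvB_search (PySem.List.enumerate junctions) junction_id := by
        unfold findMapingConnectin; simp [pvA_firstLoop_eq_search]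
      simp only [Bool.false_eq_true, if_false]
      rw [pvB_fold_inv junction_id junctions 0 0 (-1) (by omega), hA]
      simp
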